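-- pv_equiv track=rewrite | github.com/gvtret/asn2cpp | asn2cpp.py | strip_constraints
-- ===== SOURCE A (Python) =====
-- CONSTRAINT_MARKERS = ("{", "(", "[")
--
-- def strip_constraints(asn_type: str) -> str:
--     """Remove constraint suffixes such as {...}, (...) or [...]."""
--     if not asn_type:
--         return ""
--     cut_positions = [
--         pos
--         for marker in CONSTRAINT_MARKERS
--         for pos in [asn_type.find(marker)]
--         if pos != -1
--     ]
--     if not cut_positions:
--         return asn_type
--     return asn_type[: min(cut_positions)]
-- ===== SOURCE B (Python) =====
-- CONSTRAINT_MARKERS = ("{", "(", "[")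
--
-- def strip_constraints(asn_type: str) -> str:
--     """Remove constraint suffixes such as {...}, (...) or [...]."""
--     out = []
--     for ch in asn_type:
--         if ch in "{([":
--             return "".join(out)
--         out.append(ch)
--     return asn_type
-- ===== Notes on version B (the rewrite author's own statement) =====
-- stated objective: simpler
-- what changed: B replaces A's three separate find() scans plus a comprehension and min() with a single left-to-right pass that accumulates the prefix and stops at the first marker character.
import Mathlib
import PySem

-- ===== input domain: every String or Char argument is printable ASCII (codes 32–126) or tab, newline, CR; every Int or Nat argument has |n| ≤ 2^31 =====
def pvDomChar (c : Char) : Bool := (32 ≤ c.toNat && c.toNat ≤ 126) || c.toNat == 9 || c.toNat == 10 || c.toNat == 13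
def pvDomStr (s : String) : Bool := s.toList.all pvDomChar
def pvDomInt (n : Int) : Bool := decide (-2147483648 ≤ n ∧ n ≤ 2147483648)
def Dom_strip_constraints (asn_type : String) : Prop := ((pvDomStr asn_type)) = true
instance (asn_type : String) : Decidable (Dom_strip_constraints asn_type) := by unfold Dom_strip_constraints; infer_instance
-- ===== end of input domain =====

-- B replaces the three separate find() scans + min() with a single left-to-right pass that
-- collects the prefix and stops at the first marker (objective: simpler, one pass).


-- ===== PORT A =====
-- CONSTRAINT_MARKERS = ("{", "(", "[")
def pvMarkers : List String := ["{", "(", "["]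

def strip_constraints (asn_type : String) : String :=
  if asn_type = "" then ""
  else
    -- [pos for marker in CONSTRAINT_MARKERS for pos in [asn_type.find(marker)] if pos != -1]
    let cut_positions :=
      (pvMarkers.map (fun marker => PySem.Str.find asn_type marker)).filter (fun pos => pos != -1)
    if cut_positions = [] then asn_type
    else PySem.Str.slice asn_type none (PySem.List.min? cut_positions (fun x => x))

-- ===== PORT B =====
-- the loop over the characters: out accumulated left to right, first marker returns "".join(out)
def pvAltGo (s : String) : List Char → List Char → String
  | [], _ => s
  | c :: cs, out =>
    if c = '{' ∨ c = '(' ∨ c = '[' then String.ofList out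
    else pvAltGo s cs (out ++ [c])

def strip_constraints_alt (asn_type : String) : String :=
  pvAltGo asn_type asn_type.toList []

-- ===== PRECONDITION & SPEC =====
def Spec_strip_constraints (asn_type : String) (out : String) : Prop := out = strip_constraints_alt asn_type
instance (asn_type : String) (out : String) : Decidable (Spec_strip_constraints asn_type out) := by unfold Spec_strip_constraints; infer_instance

-- ===== CLAIM (what is proved, stated in full; the proofs are below) =====
def Claim_equal_strip_constraints : Prop := ∀ (asn_type : String), Dom_strip_constraints asn_type → Spec_strip_constraints asn_type (strip_constraints asn_type)

-- ===== LEMMAS AND PROOFS =====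

-- marker predicate shared by the characterisations of both ports
def pvIsM (c : Char) : Bool := c = '{' || c = '(' || c = '['

-- single-character find, with accumulator, in terms of List.findIdx
lemma pv_find_go_single (c : Char) (l : List Char) (k : Nat) :
    PySem.Chars.find.go [c] l k =
      if l.findIdx (· = c) < l.length then ((k + l.findIdx (· = c) : Nat) : Int) else -1 := by
  induction l generalizing k with
  | nil => simp [PySem.Chars.find.go]
  | cons a t ih =>
    simp only [PySem.Chars.find.go, List.isPrefixOf, Bool.and_true, List.findIdx_cons,
      List.length_cons]
    by_cases hca : c = a
    · subst hca
      simp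
    · have h' : (a = c) = False := eq_false (fun h => hca h.symm)
      simp only [h', decide_false, cond_false, beq_iff_eq, if_neg hca, ih]
      by_cases h : t.findIdx (· = c) < t.length
      · rw [if_pos h, if_pos (by omega)]; push_cast; ring
      · rw [if_neg h, if_neg (by omega)]

lemma pv_find_single (c : Char) (l : List Char) :
    PySem.Chars.find l [c] =
      if l.findIdx (· = c) < l.length then ((l.findIdx (· = c) : Nat) : Int) else -1 := by
  simpa [PySem.Chars.find] using pv_find_go_single c l 0

-- the first marker index is the min of the three single-marker first indices
lemma pv_findIdx_min3 (l : List Char) :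
    l.findIdx pvIsM =
      min (min (l.findIdx (· = '{')) (l.findIdx (· = '('))) (l.findIdx (· = '[')) := by
  induction l with
  | nil => simp
  | cons a t ih =>
    by_cases h : pvIsM a = true
    · have : a = '{' ∨ a = '(' ∨ a = '[' := by simp [pvIsM] at h; tauto
      rcases this with h1 | h1 | h1 <;> subst h1 <;>
        simp [List.findIdx_cons, pvIsM, ih]
    · have h' : ¬ (a = '{') ∧ ¬ (a = '(') ∧ ¬ (a = '[') := by
        simp [pvIsM] at h; tauto
      simp [List.findIdx_cons, h, h'.1, h'.2.1, h'.2.2, ih]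

-- characterisation of B's loop
lemma pv_altGo_spec (s : String) (l out : List Char) :
    pvAltGo s l out =
      if l.findIdx pvIsM < l.length then String.ofList (out ++ l.take (l.findIdx pvIsM)) else s := by
  induction l generalizing out with
  | nil => simp [pvAltGo]
  | cons c cs ih =>
    by_cases h : pvIsM c = true
    · have hc : c = '{' ∨ c = '(' ∨ c = '[' := by simp [pvIsM] at h; tauto
      simp [pvAltGo, if_pos hc, List.findIdx_cons, h]
    · have hc : ¬ (c = '{' ∨ c = '(' ∨ c = '[') := by
        simp [pvIsM] at h; tauto
      rw [pvAltGo, if_neg hc, ih]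
      simp only [List.findIdx_cons, h, cond_false, List.length_cons]
      by_cases hlt : cs.findIdx pvIsM < cs.length
      · rw [if_pos hlt, if_pos (by omega)]
        simp
      · rw [if_neg hlt, if_neg (by omega)]

-- slicing a string to a natural bound is take on its characters
lemma pv_slice_take (s : String) (n : Nat) :
    PySem.Str.slice s none (some (n : Int)) = String.ofList (s.toList.take n) := by
  apply String.toList_inj.mp
  rw [PySem.Str.toList_slice, PySem.Chars.slice_eq_listSlice, PySem.List.slice_to_natCast,
    String.toList_ofList]

-- ===== VERDICT (by name: the statement is the Claim_ definition above) =====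
theorem strip_constraints_spec : Claim_equal_strip_constraints := by
  intro s _
  show strip_constraints s = strip_constraints_alt s
  unfold strip_constraints strip_constraints_alt pvMarkers
  rw [pv_altGo_spec]
  by_cases hs : s = ""
  · subst hs; simp
  rw [if_neg hs]
  have h1 : PySem.Str.find s "{" = PySem.Chars.find s.toList ['{'] := PySem.Str.find_eq s "{"
  have h2 : PySem.Str.find s "(" = PySem.Chars.find s.toList ['('] := PySem.Str.find_eq s "("
  have h3 : PySem.Str.find s "[" = PySem.Chars.find s.toList ['['] := PySem.Str.find_eq s "["
  set l := s.toList with hl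
  simp only [List.map, h1, h2, h3, pv_find_single]
  set n1 := l.findIdx (· = '{') with hn1
  set n2 := l.findIdx (· = '(') with hn2
  set n3 := l.findIdx (· = '[') with hn3
  have hJ := pv_findIdx_min3 l
  rw [← hn1, ← hn2, ← hn3] at hJ
  have hle1 : n1 ≤ l.length := hn1 ▸ List.findIdx_le_length
  have hle2 : n2 ≤ l.length := hn2 ▸ List.findIdx_le_length
  have hle3 : n3 ≤ l.length := hn3 ▸ List.findIdx_le_length
  have hB : l.findIdx pvIsM ≤ l.length := List.findIdx_le_length
  by_cases c1 : n1 < l.length <;> by_cases c2 : n2 < l.length <;> by_cases c3 : n3 < l.length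
  · rw [if_pos c1, if_pos c2, if_pos c3]
    have e1 : (((n1 : Int)) != -1) = true := by simp [bne_iff_ne]
    have e2 : (((n2 : Int)) != -1) = true := by simp [bne_iff_ne]
    have e3 : (((n3 : Int)) != -1) = true := by simp [bne_iff_ne]
    simp only [List.filter_cons, e1, e2, e3, if_true, List.filter_nil]
    rw [if_neg (by simp), PySem.List.min?_id_cons]
    have hm : List.foldl min ((n1 : Int)) [(n2 : Int), (n3 : Int)]
        = ((l.findIdx pvIsM : Nat) : Int) := by
      simp only [List.foldl]; omega
    rw [hm, pv_slice_take, if_pos (by omega)]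
    simp [hl]
  · rw [if_pos c1, if_pos c2, if_neg c3]
    have e1 : (((n1 : Int)) != -1) = true := by simp [bne_iff_ne]
    have e2 : (((n2 : Int)) != -1) = true := by simp [bne_iff_ne]
    have eneg : (((-1 : Int)) != -1) = false := by simp
    simp only [List.filter_cons, e1, e2, eneg, if_true, if_false, Bool.false_eq_true, List.filter_nil]
    rw [if_neg (by simp), PySem.List.min?_id_cons]
    have hm : List.foldl min ((n1 : Int)) [(n2 : Int)]
        = ((l.findIdx pvIsM : Nat) : Int) := by
      simp only [List.foldl]; omega
    rw [hm, pv_slice_take, if_pos (by omega)]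
    simp [hl]
  · rw [if_pos c1, if_neg c2, if_pos c3]
    have e1 : (((n1 : Int)) != -1) = true := by simp [bne_iff_ne]
    have e3 : (((n3 : Int)) != -1) = true := by simp [bne_iff_ne]
    have eneg : (((-1 : Int)) != -1) = false := by simp
    simp only [List.filter_cons, e1, e3, eneg, if_true, if_false, Bool.false_eq_true, List.filter_nil]
    rw [if_neg (by simp), PySem.List.min?_id_cons]
    have hm : List.foldl min ((n1 : Int)) [(n3 : Int)]
        = ((l.findIdx pvIsM : Nat) : Int) := by
      simp only [List.foldl]; omega
    rw [hm, pv_slice_take, if_pos (by omega)]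
    simp [hl]
  · rw [if_pos c1, if_neg c2, if_neg c3]
    have e1 : (((n1 : Int)) != -1) = true := by simp [bne_iff_ne]
    have eneg : (((-1 : Int)) != -1) = false := by simp
    simp only [List.filter_cons, e1, eneg, if_true, if_false, Bool.false_eq_true, List.filter_nil]
    rw [if_neg (by simp), PySem.List.min?_id_cons]
    have hm : List.foldl min ((n1 : Int)) []
        = ((l.findIdx pvIsM : Nat) : Int) := by
      simp only [List.foldl]; omega
    rw [hm, pv_slice_take, if_pos (by omega)]
    simp [hl]
  · rw [if_neg c1, if_pos c2, if_pos c3]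
    have e2 : (((n2 : Int)) != -1) = true := by simp [bne_iff_ne]
    have e3 : (((n3 : Int)) != -1) = true := by simp [bne_iff_ne]
    have eneg : (((-1 : Int)) != -1) = false := by simp
    simp only [List.filter_cons, e2, e3, eneg, if_true, if_false, Bool.false_eq_true, List.filter_nil]
    rw [if_neg (by simp), PySem.List.min?_id_cons]
    have hm : List.foldl min ((n2 : Int)) [(n3 : Int)]
        = ((l.findIdx pvIsM : Nat) : Int) := by
      simp only [List.foldl]; omega
    rw [hm, pv_slice_take, if_pos (by omega)]
    simp [hl]
  · rw [if_neg c1, if_pos c2, if_neg c3]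
    have e2 : (((n2 : Int)) != -1) = true := by simp [bne_iff_ne]
    have eneg : (((-1 : Int)) != -1) = false := by simp
    simp only [List.filter_cons, e2, eneg, if_true, if_false, Bool.false_eq_true, List.filter_nil]
    rw [if_neg (by simp), PySem.List.min?_id_cons]
    have hm : List.foldl min ((n2 : Int)) []
        = ((l.findIdx pvIsM : Nat) : Int) := by
      simp only [List.foldl]; omega
    rw [hm, pv_slice_take, if_pos (by omega)]
    simp [hl]
  · rw [if_neg c1, if_neg c2, if_pos c3]
    have e3 : (((n3 : Int)) != -1) = true := by simp [bne_iff_ne]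
    have eneg : (((-1 : Int)) != -1) = false := by simp
    simp only [List.filter_cons, e3, eneg, if_true, if_false, Bool.false_eq_true, List.filter_nil]
    rw [if_neg (by simp), PySem.List.min?_id_cons]
    have hm : List.foldl min ((n3 : Int)) []
        = ((l.findIdx pvIsM : Nat) : Int) := by
      simp only [List.foldl]; omega
    rw [hm, pv_slice_take, if_pos (by omega)]
    simp [hl]
  · rw [if_neg c1, if_neg c2, if_neg c3]
    have eneg : (((-1 : Int)) != -1) = false := by simp
    simp only [List.filter_cons, eneg, if_true, if_false, Bool.false_eq_true, List.filter_nil]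
    rw [if_neg (by omega)]
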